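-- pv_equiv track=rewrite | github.com/aorursy/KT_dataset_py | ksymoens_covid-19-topic-modelling-and-rule-based-matching.py | merge_section_texts
-- ===== SOURCE A (Python) =====
-- def merge_section_texts(paragraphs_list):
--     """
--     Concatenate paragraph texts of the same section
--     :param paragraphs_list:
--     :return:
--     """
--     merged_index = 0
--     merged_paragraphs = [paragraphs_list[0]]
--     for index in range(1, len(paragraphs_list)):
--         if merged_paragraphs[merged_index][0] == paragraphs_list[index][0]:
--             merged_paragraphs[merged_index] = (merged_paragraphs[merged_index][0], ' '.join(
--                 [merged_paragraphs[merged_index][1], paragraphs_list[index][1]]))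
--         else:
--             merged_index += 1
--             merged_paragraphs.append(paragraphs_list[index])
--     return merged_paragraphs
-- ===== SOURCE B (Python) =====
-- def merge_section_texts(paragraphs_list):
--     """
--     Concatenate paragraph texts of the same section.
--     Group-and-flush rewrite: collect the texts of the current section in a
--     list and join them once when the section changes, instead of re-joining
--     the last output entry on every paragraph.  Returns [] on empty input
--     (A raises IndexError there).
--     """
--     if not paragraphs_list:
--         return []
--     merged = []
--     key = paragraphs_list[0][0]
--     texts = [paragraphs_list[0][1]]
--     for sec, text in paragraphs_list[1:]:
--         if key == sec:
--             texts.append(text)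
--         else:
--             merged.append((key, ' '.join(texts)))
--             key, texts = sec, [text]
--     merged.append((key, ' '.join(texts)))
--     return merged
-- ===== Notes on version B (the rewrite author's own statement) =====
-- stated objective: alternative
-- what changed: B groups a run of same-section paragraphs into a text list and joins it once per group on flush, instead of A's pointer-based scan that rewrites the last output entry with a pairwise join for every paragraph; B also returns [] on empty input where A raises IndexError.
-- crash fix: On the empty list A raises IndexError (it indexes paragraphs_list[0]); B returns []. — e.g. on merge_section_texts([]): A raises IndexError, B returns []
import Mathlib
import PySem

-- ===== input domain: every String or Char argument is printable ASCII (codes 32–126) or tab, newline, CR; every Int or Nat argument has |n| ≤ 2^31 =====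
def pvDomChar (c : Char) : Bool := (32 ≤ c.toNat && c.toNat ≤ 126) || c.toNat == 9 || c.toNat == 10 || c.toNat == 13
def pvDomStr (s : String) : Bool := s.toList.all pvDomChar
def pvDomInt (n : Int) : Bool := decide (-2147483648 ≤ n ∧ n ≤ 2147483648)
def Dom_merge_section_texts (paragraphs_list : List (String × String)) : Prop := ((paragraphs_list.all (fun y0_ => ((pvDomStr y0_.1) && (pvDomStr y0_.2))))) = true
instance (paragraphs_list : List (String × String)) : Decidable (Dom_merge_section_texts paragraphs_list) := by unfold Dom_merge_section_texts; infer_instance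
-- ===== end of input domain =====

-- B replaces A's in-place rewrite of the last output entry by a group-and-flush pass; return values proved equal on nonempty input.

-- ===== PORT A =====
-- A's merged_index always points at the last element of merged_paragraphs, so
-- merged_paragraphs[merged_index] is modelled by getLast?/dropLast; ' '.join([x, y])
-- is PySem.Str.join " " [x, y].
def merge_section_texts (paragraphs_list : List (String × String)) : List (String × String) :=
  match paragraphs_list with
  | [] => []   -- Python raises IndexError here (paragraphs_list[0]); excluded by Pre_
  | p0 :: rest =>
      rest.foldl (fun merged p =>
        match merged.getLast? with
        | some last =>
            if last.1 == p.1 then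
              merged.dropLast ++ [(last.1, PySem.Str.join " " [last.2, p.2])]
            else merged ++ [p]
        | none => merged) [p0]

-- ===== PORT B =====
-- the loop of Source B: state = (merged, key, texts); flush joins the collected texts once
def mstFlush (merged : List (String × String)) (key : String) (texts : List String)
    (rest : List (String × String)) : List (String × String) :=
  match rest with
  | [] => merged ++ [(key, PySem.Str.join " " texts)]
  | q :: rs =>
      if key == q.1 then mstFlush merged key (texts ++ [q.2]) rs
      else mstFlush (merged ++ [(key, PySem.Str.join " " texts)]) q.1 [q.2] rs

def merge_section_texts_alt (paragraphs_list : List (String × String)) : List (String × String) :=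
  match paragraphs_list with
  | [] => []
  | p0 :: rest => mstFlush [] p0.1 [p0.2] rest

-- ===== PRECONDITION & SPEC =====
-- Pre_ excludes only the empty list, on which Python A raises IndexError.
def Pre_merge_section_texts (paragraphs_list : List (String × String)) : Prop :=
  paragraphs_list ≠ []
instance (paragraphs_list : List (String × String)) : Decidable (Pre_merge_section_texts paragraphs_list) := by unfold Pre_merge_section_texts; infer_instance
def pvWitness_merge_section_texts : (List (String × String)) := [("intro", "hello")]

-- On the empty list A raises IndexError (it indexes paragraphs_list[0]); B returns [].
def Raises_merge_section_texts (paragraphs_list : List (String × String)) : Prop :=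
  paragraphs_list = []
instance (paragraphs_list : List (String × String)) : Decidable (Raises_merge_section_texts paragraphs_list) := by unfold Raises_merge_section_texts; infer_instance
def pvRaiseWitness_merge_section_texts : (List (String × String)) := []
def pvRaiseWitnessOut_merge_section_texts : List (String × String) := []

def Spec_merge_section_texts (paragraphs_list : List (String × String)) (out : List (String × String)) : Prop := out = merge_section_texts_alt paragraphs_list
instance (paragraphs_list : List (String × String)) (out : List (String × String)) : Decidable (Spec_merge_section_texts paragraphs_list out) := by unfold Spec_merge_section_texts; infer_instance

-- ===== CLAIM (what is proved, stated in full; the proofs are below) =====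
def Claim_equal_merge_section_texts : Prop := ∀ (paragraphs_list : List (String × String)), Dom_merge_section_texts paragraphs_list → Pre_merge_section_texts paragraphs_list → Spec_merge_section_texts paragraphs_list (merge_section_texts paragraphs_list)

def Claim_raises_merge_section_texts : Prop := (∀ (paragraphs_list : List (String × String)), Dom_merge_section_texts paragraphs_list → Raises_merge_section_texts paragraphs_list → ¬ Pre_merge_section_texts paragraphs_list) ∧ (Dom_merge_section_texts (pvRaiseWitness_merge_section_texts) ∧ Raises_merge_section_texts (pvRaiseWitness_merge_section_texts) ∧ merge_section_texts_alt (pvRaiseWitness_merge_section_texts) = pvRaiseWitnessOut_merge_section_texts)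

-- ===== LEMMAS AND PROOFS =====

-- ' '.join of a single string is that string
lemma str_join_singleton (t : String) : PySem.Str.join " " [t] = t := by
  simp [PySem.Str.join, PySem.Chars.join_singleton]

-- Chars-level: joining one more piece appends sep ++ piece
lemma chars_join_concat (sep a t : List Char) (ts : List (List Char)) :
    PySem.Chars.join sep ((a :: ts) ++ [t]) = PySem.Chars.join sep (a :: ts) ++ sep ++ t := by
  induction ts generalizing a with
  | nil => simp [PySem.Chars.join_cons_cons, PySem.Chars.join_singleton]
  | cons b ts ih =>
      rw [List.cons_append, List.cons_append, PySem.Chars.join_cons_cons,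
        ← List.cons_append, ih b, PySem.Chars.join_cons_cons]
      simp [List.append_assoc]

-- Str-level: incremental pairwise join equals join of the extended text list
lemma str_join_concat (a t : String) (ts : List String) :
    PySem.Str.join " " ((a :: ts) ++ [t])
      = PySem.Str.join " " [PySem.Str.join " " (a :: ts), t] := by
  simp only [PySem.Str.join, List.map_append, List.map_cons, List.map_nil]
  rw [chars_join_concat]
  rw [PySem.Chars.join_cons_cons]
  simp [PySem.Chars.join_singleton]

-- loop invariant: A's fold starting from merged ++ [(key, join texts)] equals B's flush loop
lemma fold_eq_flush (rest : List (String × String)) :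
    ∀ (merged : List (String × String)) (key : String) (a : String) (ts : List String),
    List.foldl (fun merged p =>
        match merged.getLast? with
        | some last =>
            if last.1 == p.1 then
              merged.dropLast ++ [(last.1, PySem.Str.join " " [last.2, p.2])]
            else merged ++ [p]
        | none => merged) (merged ++ [(key, PySem.Str.join " " (a :: ts))]) rest
      = mstFlush merged key (a :: ts) rest := by
  induction rest with
  | nil => intro merged key a ts; simp [mstFlush]
  | cons q rs ih =>
      intro merged key a ts
      simp only [List.foldl_cons, List.getLast?_concat, List.dropLast_concat, mstFlush]
      by_cases h : key = q.1
      · simp only [h, beq_self_eq_true, if_true, ← str_join_concat]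
        exact ih merged q.1 a (ts ++ [q.2])
      · have hb : (key == q.1) = false := beq_eq_false_iff_ne.mpr h
        simp only [hb, Bool.false_eq_true, if_false]
        have := ih (merged ++ [(key, PySem.Str.join " " (a :: ts))]) q.1 q.2 []
        simpa [str_join_singleton, List.append_assoc] using this

-- ===== VERDICT (by name: the statement is the Claim_ definition above) =====
theorem merge_section_texts_spec : Claim_equal_merge_section_texts := by
  intro l _ hpre
  unfold Spec_merge_section_texts
  match l with
  | [] => exact absurd rfl hpre
  | p0 :: rest =>
      show (rest.foldl _ [p0]) = mstFlush [] p0.1 [p0.2] rest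
      have := fold_eq_flush rest [] p0.1 p0.2 []
      simpa [str_join_singleton] using this

theorem merge_section_texts_raises : Claim_raises_merge_section_texts := by
  unfold Claim_raises_merge_section_texts
  exact ⟨fun l _ h => by simp [Raises_merge_section_texts] at h; simp [Pre_merge_section_texts, h], by decide⟩

-- self-check: the raise witness lies outside Pre_ and B's port returns the stated literal there
theorem pvRaiseWitness_ok :
    ¬ Pre_merge_section_texts pvRaiseWitness_merge_section_texts ∧
      merge_section_texts_alt pvRaiseWitness_merge_section_texts = pvRaiseWitnessOut_merge_section_texts :=
  ⟨merge_section_texts_raises.1 _ (by decide) merge_section_texts_raises.2.2.1,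
    merge_section_texts_raises.2.2.2⟩
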